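-- pv_equiv track=rewrite | github.com/4RG0S/2019-Fall-Coding-Test | Programmers/위장/김현묵/Solution.py | solution
-- ===== SOURCE A (Python) =====
-- from itertools import combinations
--
-- def solution(clothes):
--
--     answer = 0
--
--     clothesCategory = {}
--     clothesName = []
--
--     keyNum = 0
--     valueNum = 0
--     divideHash = {}
--
--     # 각 옷의 종류를 key로 옷의 이름을 value로 해서 clothesCategory 해쉬에 저장해 놓습니다.
--     # 모든 옷들을 clothesName 리스트에 저장해 놓습니다.
--     for i in clothes:
--
--         clothesName.append(i[0])
--
--         if i[1] in clothesCategory: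
--             clothesCategory[i[1]].append(i[0])
--         else:
--             clothesCategory[i[1]] = []
--             clothesCategory[i[1]].append(i[0])
--
--     listKeys = list(clothesCategory.keys())
--
--     # 총 옷의 종류를 keyNum에 저장해 놓습니다.
--     for z in listKeys:
--         keyNum = keyNum + 1
--
--     # 총 옷의 개수입니다.
--     valueNum = len(clothesName)
--
--     # 옷을 1개씩 낱개로 고를 때를 answer에 더해줍니다.
--     answer = answer + valueNum
--
--
--     for o in listKeys:
--         divideHash[o] = 0
--
--     # 옷을 2개 이상씩 조합을 할 때의 경우입니다.
--     # 모든 조합을 구한후에 같은 종류의 옷을 2개 이상 포함 할수 있으니 그 경우는 빼줍니다.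
--     for w in range(2, keyNum+1):
--         listCombi = (list(combinations(clothesName, w)))
--         answer = answer + len(listCombi)
--         for u in listCombi:
--             for e in u:
--                 for r in listKeys:
--                     if e in clothesCategory[r]:
--                         divideHash[r] = divideHash[r] + 1
--
--
--             for p in listKeys:
--                 if divideHash[p] >= 2:
--                     answer = answer - 1
--                     break
--
--             for t in listKeys:
--                 divideHash[t] = 0
--
--
--     # 답을 return 해줍니다.
--     return answer
-- ===== SOURCE B (Python) =====
-- def solution(clothes):
--     counts = {}
--     for _, category in clothes:
--         counts[category] = counts.get(category, 0) + 1
--     answer = 1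
--     for c in counts.values():
--         answer *= c + 1
--     return answer - 1
-- ===== Notes on version B (the rewrite author's own statement) =====
-- stated objective: faster
-- what changed: Replaces enumerating all combinations of garments and rejecting those with a repeated category by the closed-form product of (category size + 1) over categories, minus 1.
-- outside the precondition, e.g. on solution([('d', 'y'), ('d', 'x'), ('a', 'y')]): A returns 3, B returns 5
import Mathlib
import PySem

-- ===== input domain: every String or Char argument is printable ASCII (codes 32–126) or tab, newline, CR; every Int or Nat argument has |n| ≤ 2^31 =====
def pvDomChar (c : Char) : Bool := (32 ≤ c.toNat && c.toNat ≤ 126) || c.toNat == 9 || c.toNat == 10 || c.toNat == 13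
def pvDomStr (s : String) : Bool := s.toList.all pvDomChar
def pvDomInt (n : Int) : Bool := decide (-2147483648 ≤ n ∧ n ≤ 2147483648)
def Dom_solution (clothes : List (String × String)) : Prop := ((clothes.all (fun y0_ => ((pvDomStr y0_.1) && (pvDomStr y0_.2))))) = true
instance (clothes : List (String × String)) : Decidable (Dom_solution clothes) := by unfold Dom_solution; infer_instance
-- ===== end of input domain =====

-- B replaces A's enumeration of all garment combinations by the closed-form product
-- of (category size + 1) over the categories, minus 1 (objective: faster).

-- ===== PORT A =====
-- itertools.combinations(pool, r) for r >= 0: the tuples (as lists) in itertools' order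
def pyCombos {α : Type} : Nat → List α → List (List α)
  | 0, _ => [[]]
  | _ + 1, [] => []
  | n + 1, x :: xs => (pyCombos n xs).map (fun t => x :: t) ++ pyCombos (n + 1) xs
  termination_by n l => (l.length, n)


def solution (clothes : List (String × String)) : Int :=
  let answer : Int := 0
  let st := clothes.foldl
    (fun (st : List String × PySem.Dict String (List String)) i =>
      (st.1 ++ [i.1],
       if st.2.contains i.2 then st.2.modify i.2 [] (fun l => l ++ [i.1])
       else ((st.2.insert i.2 []).modify i.2 [] (fun l => l ++ [i.1]))))
    ([], PySem.Dict.empty)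
  let clothesName := st.1
  let clothesCategory := st.2
  let listKeys := clothesCategory.keys
  let keyNum : Int := listKeys.foldl (fun z _ => z + 1) 0
  let valueNum : Int := (clothesName.length : Int)
  let answer := answer + valueNum
  let divideHash : PySem.Dict String Int := listKeys.foldl (fun d o => d.insert o 0) PySem.Dict.empty
  let res := (PySem.List.pyRange 2 (keyNum + 1) 1).foldl
    (fun (st : Int × PySem.Dict String Int) w =>
      let listCombi := pyCombos w.toNat clothesName
      let answer := st.1 + (listCombi.length : Int)
      listCombi.foldl
        (fun (st : Int × PySem.Dict String Int) u =>
          let dh := u.foldl (fun dh e =>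
            listKeys.foldl (fun (dh : PySem.Dict String Int) r =>
              if e ∈ clothesCategory.getD r [] then dh.modify r 0 (fun x => x + 1) else dh) dh) st.2
          let answer := if listKeys.any (fun p => 2 ≤ dh.getD p 0) then st.1 - 1 else st.1
          let dh := listKeys.foldl (fun (d : PySem.Dict String Int) t => d.insert t 0) dh
          (answer, dh))
        (answer, st.2))
    (answer, divideHash)
  res.1

-- ===== PORT B =====
def solution_alt (clothes : List (String × String)) : Int :=
  let counts : PySem.Dict String Int :=
    clothes.foldl (fun d i => d.insert i.2 (d.getD i.2 0 + 1)) PySem.Dict.empty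
  let answer : Int := counts.values.foldl (fun a c => a * (c + 1)) 1
  answer - 1


-- ===== PRECONDITION & SPEC =====
-- Pre_ excludes lists in which the same clothing-item name occurs twice: there A counts
-- name combinations (and tests category membership by name), so its value is an accident
-- of the name list; item names act as unique identifiers in this task.
def Pre_solution (clothes : List (String × String)) : Prop := (clothes.map Prod.fst).Nodup
instance (clothes : List (String × String)) : Decidable (Pre_solution clothes) := by unfold Pre_solution; infer_instance
def pvWitness_solution : (List (String × String)) := [("a", "x"), ("b", "x"), ("c", "y")]

def Spec_solution (clothes : List (String × String)) (out : Int) : Prop := out = solution_alt clothes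
instance (clothes : List (String × String)) (out : Int) : Decidable (Spec_solution clothes out) := by unfold Spec_solution; infer_instance

-- ===== CLAIM (what is proved, stated in full; the proofs are below) =====
def Claim_equal_solution : Prop := ∀ (clothes : List (String × String)), Dom_solution clothes → Pre_solution clothes → Spec_solution clothes (solution clothes)

-- ===== LEMMAS AND PROOFS =====
theorem pyCombos_perm {α : Type} : ∀ (w : Nat) (l : List α), (pyCombos w l).Perm (List.sublistsLen w l)
  | 0, l => by simp [pyCombos]
  | _ + 1, [] => by simp [pyCombos]
  | n + 1, x :: xs => by
    rw [pyCombos, List.sublistsLen_succ_cons]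
    exact (((pyCombos_perm n xs).map _).append (pyCombos_perm (n+1) xs)).trans List.perm_append_comm
  termination_by w l => (l.length, w)

theorem countP_nodup_avoid {α β : Type} [DecidableEq β] (f : α → β) :
    ∀ (l : List α) (T : Finset β),
    (l.sublists'.countP (fun S => decide ((S.map f).Nodup) && decide (∀ a ∈ S, f a ∉ T)))
      = ∏ b ∈ (l.map f).toFinset \ T, ((l.map f).count b + 1)
  | [], T => by simp
  | a :: l, T => by
    rw [List.sublists'_cons, List.countP_append, List.countP_map]
    by_cases h : f a ∈ T
    · have h2 : (List.countP ((fun S => decide ((S.map f).Nodup) && decide (∀ x ∈ S, f x ∉ T)) ∘ List.cons a) l.sublists') = 0 := by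
        apply List.countP_eq_zero.2
        intro S _ hc
        simp only [Function.comp_apply, Bool.and_eq_true, decide_eq_true_eq] at hc
        exact hc.2 a (by simp) h
      rw [h2, countP_nodup_avoid f l T]
      have hset : (((a :: l).map f).toFinset \ T) = ((l.map f).toFinset \ T) := by
        simp only [List.map_cons, List.toFinset_cons]
        exact Finset.insert_sdiff_of_mem _ h
      rw [hset, Nat.add_zero]
      apply Finset.prod_congr rfl
      intro b hb
      have hbne : b ≠ f a := by
        rintro rfl; exact (Finset.mem_sdiff.1 hb).2 h
      simp [Ne.symm hbne]
    · have h2 : (List.countP ((fun S => decide ((S.map f).Nodup) && decide (∀ x ∈ S, f x ∉ T)) ∘ List.cons a) l.sublists')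
          = List.countP (fun S => decide ((S.map f).Nodup) && decide (∀ x ∈ S, f x ∉ insert (f a) T)) l.sublists' := by
        apply List.countP_congr
        intro S _
        simp only [Function.comp_apply, Bool.and_eq_true, decide_eq_true_eq, List.map_cons,
          List.nodup_cons, List.mem_cons, Finset.mem_insert, List.mem_map]
        constructor
        · rintro ⟨⟨hna, hnd⟩, hav⟩
          refine ⟨hnd, fun x hx => ?_⟩
          rw [not_or]
          refine ⟨fun hfx => hna ⟨x, hx, by simp [hfx]⟩ , hav x (Or.inr hx)⟩
        · rintro ⟨hnd, hav⟩
          refine ⟨⟨fun ⟨x, hx, hfx⟩ => ?_, hnd⟩, fun x hx => ?_⟩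
          · exact (not_or.1 (hav x hx)).1 (by simp [hfx])
          · rcases hx with rfl | hx
            · exact h
            · exact (not_or.1 (hav x hx)).2
      rw [h2, countP_nodup_avoid f l T, countP_nodup_avoid f l (insert (f a) T)]
      -- arithmetic on products
      set M := l.map f with hM
      set P := ∏ b ∈ M.toFinset \ insert (f a) T, (M.count b + 1) with hP
      have claim1 : (∏ b ∈ M.toFinset \ T, (M.count b + 1)) = (M.count (f a) + 1) * P := by
        by_cases hfa : f a ∈ M.toFinset
        · have hsets : M.toFinset \ T = insert (f a) (M.toFinset \ insert (f a) T) := by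
            ext b
            simp only [Finset.mem_sdiff, Finset.mem_insert]
            constructor
            · rintro ⟨hbM, hbT⟩
              by_cases hb : b = f a
              · exact Or.inl hb
              · exact Or.inr ⟨hbM, by simp [hb, hbT]⟩
            · rintro (rfl | ⟨hbM, hb⟩)
              · exact ⟨hfa, h⟩
              · exact ⟨hbM, fun hbT => hb (Or.inr hbT)⟩
          rw [hsets, Finset.prod_insert (by simp)]
        · have hsets : M.toFinset \ T = M.toFinset \ insert (f a) T := by
            ext b
            simp only [Finset.mem_sdiff, Finset.mem_insert]
            constructor
            · rintro ⟨hbM, hbT⟩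
              exact ⟨hbM, by rintro (rfl | hbT'); exacts [hfa hbM, hbT hbT']⟩
            · rintro ⟨hbM, hb⟩
              exact ⟨hbM, fun hbT => hb (Or.inr hbT)⟩
          have : M.count (f a) = 0 := by
            rw [List.count_eq_zero]
            simpa using hfa
          rw [hsets, this]
          ring
      have hsets2 : ((a :: l).map f).toFinset \ T = insert (f a) (M.toFinset \ insert (f a) T) := by
        ext b
        simp only [List.map_cons, List.toFinset_cons, ← hM, Finset.mem_sdiff, Finset.mem_insert]
        constructor
        · rintro ⟨(rfl | hbM), hbT⟩
          · exact Or.inl rfl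
          · by_cases hb : b = f a
            · exact Or.inl hb
            · exact Or.inr ⟨hbM, by simp [hb, hbT]⟩
        · rintro (rfl | ⟨hbM, hb⟩)
          · exact ⟨Or.inl rfl, h⟩
          · exact ⟨Or.inr hbM, fun hbT => hb (Or.inr hbT)⟩
      rw [hsets2, Finset.prod_insert (by simp), List.map_cons, List.count_cons_self]
      have hprodcongr : (∏ b ∈ M.toFinset \ insert (f a) T, ((f a :: M).count b + 1)) = P := by
        apply Finset.prod_congr rfl
        intro b hb
        have hbne : b ≠ f a := by
          intro hb'
          exact (Finset.mem_sdiff.1 hb).2 (by simp [hb'])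
        simp [Ne.symm hbne]
      rw [hprodcongr, claim1]
      ring


-- ===== helper definitions used by the proofs =====

def pvNames (clothes : List (String × String)) : List String := clothes.map (fun i => i.1)
def pvCats (clothes : List (String × String)) : List String := clothes.map (fun i => i.2)
def pvKs (clothes : List (String × String)) : List String := PySem.Set.ofList (pvCats clothes)
def pvCatOf (clothes : List (String × String)) (e : String) : String :=
  ((clothes.find? (fun p => p.1 == e)).map Prod.snd).getD ""
def pvGood (clothes : List (String × String)) (u : List String) : Bool :=
  decide ((u.map (pvCatOf clothes)).Nodup)
def pvItems (clothes : List (String × String)) (r : String) : List String :=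
  (clothes.filter (fun i => i.2 == r)).map (fun i => i.1)

-- ===== dict bookkeeping =====
theorem nodup_append_singleton {α : Type} {l : List α} {k : α} (h : l.Nodup) (hk : k ∉ l) :
    (l ++ [k]).Nodup := by
  rw [List.nodup_append]
  refine ⟨h, List.nodup_singleton k, ?_⟩
  intro a ha b hb
  rcases List.mem_singleton.1 hb with rfl
  exact fun hab => hk (hab ▸ ha)

theorem nodup_keys_modify {κ ν : Type} [BEq κ] [LawfulBEq κ] (d : PySem.Dict κ ν) (k : κ) (d0 : ν)
    (f : ν → ν) (h : d.keys.Nodup) : (d.modify k d0 f).keys.Nodup := by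
  rw [PySem.Dict.keys_modify]
  by_cases hc : d.contains k = true
  · rw [PySem.Dict.keys_insert_of_contains _ _ hc]; exact h
  · rw [PySem.Dict.keys_insert_of_not_contains _ _ (by simpa using hc)]
    exact nodup_append_singleton h (fun hm => hc ((PySem.Dict.contains_iff_mem_keys d k).2 hm))

theorem dictstep_eq (d : PySem.Dict String (List String)) (i : String × String) (h : d.keys.Nodup) :
    (if d.contains i.2 then d.modify i.2 [] (fun l => l ++ [i.1])
     else ((d.insert i.2 []).modify i.2 [] (fun l => l ++ [i.1])))
    = d.modify i.2 [] (fun l => l ++ [i.1]) := by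
  by_cases hc : d.contains i.2 = true
  · rw [if_pos hc]
  · rw [if_neg hc]
    have hcf : d.contains i.2 = false := by simpa using hc
    have hnm : i.2 ∉ d.keys := fun hm => (by simpa [hcf] using (PySem.Dict.contains_iff_mem_keys d i.2).2 hm)
    have hk1 : ((d.insert i.2 []).modify i.2 [] (fun l => l ++ [i.1])).keys = d.keys ++ [i.2] := by
      rw [PySem.Dict.keys_modify, PySem.Dict.keys_insert_of_contains _ _ (PySem.Dict.contains_insert_self d i.2 []),
        PySem.Dict.keys_insert_of_not_contains _ _ hcf]
    have hk2 : (d.modify i.2 [] (fun l => l ++ [i.1])).keys = d.keys ++ [i.2] := by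
      rw [PySem.Dict.keys_modify, PySem.Dict.keys_insert_of_not_contains _ _ hcf]
    have hndk : (d.keys ++ [i.2]).Nodup := nodup_append_singleton h hnm
    apply PySem.Dict.ext
    rw [PySem.Dict.items_eq_map_keys _ (by rw [hk1]; exact hndk) ([] : List String),
        PySem.Dict.items_eq_map_keys _ (by rw [hk2]; exact hndk) ([] : List String), hk1, hk2]
    apply List.map_congr_left
    intro q hq
    by_cases hqi : q = i.2
    · subst hqi
      rw [PySem.Dict.getD_modify_self, PySem.Dict.getD_modify_self, PySem.Dict.getD_insert_self,
        PySem.Dict.getD_of_not_contains d _ hcf]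
    · rw [PySem.Dict.getD_modify_of_ne _ _ _ hqi, PySem.Dict.getD_modify_of_ne _ _ _ hqi,
        PySem.Dict.getD_insert]
      simp [hqi]

theorem catfold_eq (l : List (String × String)) :
    ∀ (d : PySem.Dict String (List String)), d.keys.Nodup →
    l.foldl (fun d i =>
      if d.contains i.2 then d.modify i.2 [] (fun l => l ++ [i.1])
      else ((d.insert i.2 []).modify i.2 [] (fun l => l ++ [i.1]))) d
    = l.foldl (fun d i => d.modify i.2 [] (fun l => l ++ [i.1])) d := by
  induction l with
  | nil => intro d _; rfl
  | cons i l ih =>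
    intro d h
    simp only [List.foldl_cons]
    rw [dictstep_eq d i h]
    exact ih _ (nodup_keys_modify d i.2 [] _ h)

def pvCatDict (clothes : List (String × String)) : PySem.Dict String (List String) :=
  clothes.foldl (fun d i => d.modify i.2 [] (fun l => l ++ [i.1])) PySem.Dict.empty

theorem catdict_getD (clothes : List (String × String)) (r : String) :
    (pvCatDict clothes).getD r [] = pvItems clothes r := by
  unfold pvCatDict pvItems
  have : clothes.foldl (fun d i => d.modify i.2 [] (fun l => l ++ [i.1])) PySem.Dict.empty
      = (clothes.map (fun i => (i.2, i.1))).foldl (fun d p => d.modify p.1 [] (fun l => l ++ [p.2])) PySem.Dict.empty := by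
    rw [List.foldl_map]
  rw [this, PySem.Dict.getD_foldl_modify_append, PySem.Dict.getD_empty, List.filter_map, List.map_map]
  simp [Function.comp_def]

theorem catdict_keys (clothes : List (String × String)) :
    (pvCatDict clothes).keys = pvKs clothes := by
  unfold pvCatDict pvKs pvCats
  rw [PySem.Dict.keys_foldl_modify_key clothes (fun i => i.2) [] (fun _ i => (fun l => l ++ [i.1])) PySem.Dict.empty]
  rw [PySem.Dict.keys_empty]
  rfl

theorem nodup_ks (clothes : List (String × String)) : (pvKs clothes).Nodup :=
  PySem.Set.nodup_ofList _

theorem mem_ks (clothes : List (String × String)) (r : String) :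
    r ∈ pvKs clothes ↔ r ∈ pvCats clothes := PySem.Set.mem_ofList _ _

theorem mem_items (clothes : List (String × String)) (e r : String) :
    e ∈ pvItems clothes r ↔ (e, r) ∈ clothes := by
  unfold pvItems
  simp only [List.mem_map, List.mem_filter, beq_iff_eq]
  constructor
  · rintro ⟨i, ⟨hi, h2⟩, h1⟩
    have : i = (e, r) := Prod.ext h1 h2
    rwa [this] at hi
  · intro h
    exact ⟨(e, r), ⟨h, rfl⟩, rfl⟩

theorem catOf_eq (clothes : List (String × String)) (hpre : (clothes.map Prod.fst).Nodup)
    {e c : String} (h : (e, c) ∈ clothes) : pvCatOf clothes e = c := by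
  unfold pvCatOf
  have hex : (clothes.find? (fun p => p.1 == e)).isSome := by
    rw [List.find?_isSome]
    exact ⟨(e, c), h, by simp⟩
  rcases Option.isSome_iff_exists.1 hex with ⟨q, hq⟩
  have hq1 : q.1 = e := by simpa using List.find?_some hq
  have hqm : q ∈ clothes := List.mem_of_find?_eq_some hq
  have : q = (e, c) := List.inj_on_of_nodup_map hpre hqm h (by simpa using hq1)
  rw [hq, this]
  rfl

theorem mem_items_iff_catOf (clothes : List (String × String)) (hpre : (clothes.map Prod.fst).Nodup)
    {e : String} (he : e ∈ pvNames clothes) (r : String) :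
    e ∈ pvItems clothes r ↔ pvCatOf clothes e = r := by
  rw [mem_items]
  constructor
  · exact fun h => catOf_eq clothes hpre h
  · intro h
    rcases List.mem_map.1 he with ⟨i, hi, h1⟩
    have hie : i = (e, i.2) := Prod.ext h1 rfl
    have hcat : pvCatOf clothes e = i.2 := catOf_eq clothes hpre (hie ▸ hi)
    rw [← h, hcat]
    exact hie ▸ hi

theorem map_catOf (clothes : List (String × String)) (hpre : (clothes.map Prod.fst).Nodup) :
    (pvNames clothes).map (pvCatOf clothes) = pvCats clothes := by
  unfold pvNames pvCats
  rw [List.map_map]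
  apply List.map_congr_left
  intro i hi
  exact catOf_eq clothes hpre (by rwa [show (i.1, i.2) = i from rfl])

theorem catOf_mem_ks (clothes : List (String × String)) (hpre : (clothes.map Prod.fst).Nodup)
    {e : String} (he : e ∈ pvNames clothes) : pvCatOf clothes e ∈ pvKs clothes := by
  rw [mem_ks]
  rw [← map_catOf clothes hpre]
  exact List.mem_map_of_mem he

-- ===== divideHash loops =====
theorem zerofold_getD (ks : List String) :
    ∀ (d : PySem.Dict String Int) (q : String),
    ((ks.foldl (fun (d : PySem.Dict String Int) o => d.insert o 0) d).getD q 0)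
      = if q ∈ ks then 0 else d.getD q 0 := by
  induction ks with
  | nil => intro d q; simp
  | cons k ks ih =>
    intro d q
    simp only [List.foldl_cons, ih, List.mem_cons]
    by_cases hq : q ∈ ks
    · simp [hq]
    · rw [PySem.Dict.getD_insert]
      by_cases hqk : q = k <;> simp [hq, hqk]

theorem update_of_subset (ks : List String) :
    ∀ (s : PySem.Set String), (∀ x ∈ ks, x ∈ s) → PySem.Set.update s ks = s := by
  induction ks with
  | nil => intro s _; rfl
  | cons k ks ih =>
    intro s hsub
    show PySem.Set.update (PySem.Set.add s k) ks = s
    rw [PySem.Set.add_of_mem (hsub k (by simp))]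
    exact ih s (fun x hx => hsub x (by simp [hx]))

theorem inner_getD (e : String) (C : PySem.Dict String (List String)) (ks : List String)
    (hnd : ks.Nodup) : ∀ (d : PySem.Dict String Int) (q : String),
    ((ks.foldl (fun (dh : PySem.Dict String Int) r =>
        if e ∈ C.getD r [] then dh.modify r 0 (fun x => x + 1) else dh) d).getD q 0)
      = d.getD q 0 + (if q ∈ ks ∧ e ∈ C.getD q [] then 1 else 0) := by
  induction ks with
  | nil => intro d q; simp
  | cons k ks ih =>
    intro d q
    rcases List.nodup_cons.1 hnd with ⟨hk, hnd'⟩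
    simp only [List.foldl_cons, ih hnd', List.mem_cons]
    by_cases hek : e ∈ C.getD k []
    · rw [if_pos hek, PySem.Dict.getD_modify]
      by_cases hqk : q = k
      · subst hqk
        simp [hek, hk]
      · simp only [if_neg hqk]
        by_cases hq : q ∈ ks ∧ e ∈ C.getD q [] <;> simp [hq, hqk]
    · rw [if_neg hek]
      by_cases hqk : q = k
      · subst hqk; simp [hek]
      · simp [hqk]

theorem inner_keys (e : String) (C : PySem.Dict String (List String)) (ks : List String) :
    ∀ (d : PySem.Dict String Int), (∀ r ∈ ks, r ∈ d.keys) →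
    ((ks.foldl (fun (dh : PySem.Dict String Int) r =>
        if e ∈ C.getD r [] then dh.modify r 0 (fun x => x + 1) else dh) d).keys) = d.keys := by
  induction ks with
  | nil => intro d _; rfl
  | cons k ks ih =>
    intro d hsub
    simp only [List.foldl_cons]
    by_cases hek : e ∈ C.getD k []
    · rw [if_pos hek]
      have hkeys : (d.modify k 0 (fun x => x + 1)).keys = d.keys := by
        rw [PySem.Dict.keys_modify, PySem.Dict.keys_insert_of_contains _ _
          ((PySem.Dict.contains_iff_mem_keys d k).2 (hsub k (by simp)))]
      rw [ih _ (by rw [hkeys]; exact fun r hr => hsub r (by simp [hr])), hkeys]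
    · rw [if_neg hek]
      exact ih _ (fun r hr => hsub r (by simp [hr]))

theorem ufold_getD (C : PySem.Dict String (List String)) (ks : List String) (hnd : ks.Nodup)
    (u : List String) : ∀ (d : PySem.Dict String Int) (q : String),
    ((u.foldl (fun dh e => ks.foldl (fun (dh : PySem.Dict String Int) r =>
        if e ∈ C.getD r [] then dh.modify r 0 (fun x => x + 1) else dh) dh) d).getD q 0)
      = d.getD q 0 + (if q ∈ ks then (u.countP (fun e => e ∈ C.getD q []) : Int) else 0) := by
  induction u with
  | nil => intro d q; simp
  | cons e u ih =>
    intro d q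
    simp only [List.foldl_cons, ih, inner_getD e C ks hnd, List.countP_cons]
    by_cases hq : q ∈ ks
    · by_cases heq : e ∈ C.getD q []
      · simp [hq, heq]
        ring
      · simp [hq, heq]
    · simp [hq]

theorem ufold_keys (C : PySem.Dict String (List String)) (ks : List String) (u : List String) :
    ∀ (d : PySem.Dict String Int), (∀ r ∈ ks, r ∈ d.keys) →
    ((u.foldl (fun dh e => ks.foldl (fun (dh : PySem.Dict String Int) r =>
        if e ∈ C.getD r [] then dh.modify r 0 (fun x => x + 1) else dh) dh) d).keys) = d.keys := by
  induction u with
  | nil => intro d _; rfl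
  | cons e u ih =>
    intro d hsub
    simp only [List.foldl_cons]
    rw [ih _ (by rw [inner_keys e C ks d hsub]; exact hsub), inner_keys e C ks d hsub]

theorem zerofold_keys (ks : List String) (d : PySem.Dict String Int)
    (hsub : ∀ x ∈ ks, x ∈ d.keys) :
    ((ks.foldl (fun (d : PySem.Dict String Int) o => d.insert o 0) d).keys) = d.keys := by
  rw [PySem.Dict.keys_foldl_insert ks (fun _ _ => 0) d]
  exact update_of_subset ks d.keys hsub

theorem reset_eq (ks : List String) (hnd : ks.Nodup) (d : PySem.Dict String Int)
    (hkeys : d.keys = ks) :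
    (ks.foldl (fun (d : PySem.Dict String Int) t => d.insert t 0) d)
      = (ks.foldl (fun (d : PySem.Dict String Int) o => d.insert o 0) PySem.Dict.empty) := by
  apply PySem.Dict.ext
  have hk1 : (ks.foldl (fun (d : PySem.Dict String Int) t => d.insert t 0) d).keys = ks := by
    rw [zerofold_keys ks d (by rw [hkeys]; exact fun x hx => hx), hkeys]
  have hk2 : (ks.foldl (fun (d : PySem.Dict String Int) o => d.insert o 0) PySem.Dict.empty).keys = ks := by
    rw [PySem.Dict.keys_foldl_insert ks (fun _ _ => 0) PySem.Dict.empty, PySem.Dict.keys_empty]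
    have : PySem.Set.update ([] : PySem.Set String) ks = PySem.Set.ofList ks := rfl
    rw [this]
    exact PySem.Set.ofList_eq_self_of_nodup ks hnd
  rw [PySem.Dict.items_eq_map_keys _ (by rw [hk1]; exact hnd) (0 : Int),
      PySem.Dict.items_eq_map_keys _ (by rw [hk2]; exact hnd) (0 : Int), hk1, hk2]
  apply List.map_congr_left
  intro q hq
  rw [zerofold_getD ks d q, zerofold_getD ks PySem.Dict.empty q]
  simp [hq]

-- ===== generic fold helpers =====
theorem foldl_fix_snd {γ σ : Type} (L : List γ) (F : Int × σ → γ → Int × σ) (g : Int → γ → Int)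
    (z : σ) (h : ∀ (a : Int) (u : γ), u ∈ L → F (a, z) u = (g a u, z)) :
    ∀ a : Int, L.foldl F (a, z) = (L.foldl g a, z) := by
  induction L with
  | nil => intro a; rfl
  | cons u L ih =>
    intro a
    simp only [List.foldl_cons]
    rw [h a u (by simp)]
    exact ih (fun a v hv => h a v (by simp [hv])) _

theorem foldl_goodsub {γ : Type} (p : γ → Bool) (L : List γ) :
    ∀ a : Int, L.foldl (fun a u => if p u then a else a - 1) a
      = a - ((L.countP (fun u => !p u)) : Int) := by
  induction L with
  | nil => intro a; simp
  | cons u L ih =>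
    intro a
    simp only [List.foldl_cons, List.countP_cons, ih]
    by_cases hp : p u
    · simp [hp]
    · simp [hp]
      ring

theorem sum_list_range_eq (f : ℕ → ℕ) (n : ℕ) :
    ((List.range n).map f).sum = ∑ i ∈ Finset.range n, f i := by
  induction n with
  | zero => simp
  | succ n ih => rw [List.range_succ, Finset.sum_range_succ, List.map_append, List.sum_append, ih]; simp

-- pyRange 2 (K+1) fold collects exactly the terms with 2 ≤ w ≤ K
theorem pyRange_fold (g : ℕ → ℤ) (K : ℕ) (a : ℤ) :
    (PySem.List.pyRange 2 ((K : ℤ) + 1) 1).foldl (fun acc w => acc + g w.toNat) a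
      = a + ∑ w ∈ Finset.range (K + 1), (if 2 ≤ w then g w else 0) := by
  induction K with
  | zero =>
    have h1 : PySem.List.pyRange 2 (((0 : ℕ) : ℤ) + 1) 1 = [] := by decide
    rw [h1]
    simp
  | succ K ih =>
    by_cases hK : 1 ≤ K
    · have hb : (2 : ℤ) ≤ (K : ℤ) + 1 := by omega
      have : ((K + 1 : ℕ) : ℤ) + 1 = ((K : ℤ) + 1) + 1 := by push_cast; ring
      rw [this, PySem.List.pyRange_one_succ_right hb, List.foldl_append, ih]
      simp only [List.foldl_cons, List.foldl_nil, Finset.sum_range_succ]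
      have ht : ((K : ℤ) + 1).toNat = K + 1 := by
        rw [show ((K : ℤ) + 1) = ((K + 1 : ℕ) : ℤ) by push_cast; ring, Int.toNat_natCast]
      rw [ht, if_pos (show 2 ≤ K + 1 by omega)]
      ring
    · have hK0 : K = 0 := by omega
      subst hK0
      have h1 : PySem.List.pyRange 2 (((1 : ℕ) : ℤ) + 1) 1 = [] := by decide
      rw [h1]
      simp [Finset.sum_range_succ]

-- ===== the per-combination condition =====
theorem cond_eq (clothes : List (String × String)) (hpre : (clothes.map Prod.fst).Nodup)
    (u : List String) (hu : ∀ e ∈ u, e ∈ pvNames clothes) :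
    ((pvKs clothes).any (fun p => decide (2 ≤ ((u.countP (fun e => decide (e ∈ (pvCatDict clothes).getD p []))) : Int))))
      = !(pvGood clothes u) := by
  have hcount : ∀ p, (u.countP (fun e => decide (e ∈ (pvCatDict clothes).getD p [])))
      = (u.map (pvCatOf clothes)).count p := by
    intro p
    rw [List.count_eq_countP, List.countP_map]
    apply List.countP_congr
    intro e he
    simp only [Function.comp_apply, decide_eq_true_eq, beq_iff_eq]
    rw [catdict_getD]
    exact mem_items_iff_catOf clothes hpre (hu e he) p
  cases hgood : pvGood clothes u with
  | true =>
    have hnd : (u.map (pvCatOf clothes)).Nodup := by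
      have := hgood
      unfold pvGood at this
      exact of_decide_eq_true this
    simp only [Bool.not_true]
    rw [List.any_eq_false]
    intro p _
    rw [hcount p]
    have := List.nodup_iff_count_le_one.1 hnd p
    simp only [decide_eq_true_eq]
    omega
  | false =>
    have hnnd : ¬ (u.map (pvCatOf clothes)).Nodup := by
      have := hgood
      unfold pvGood at this
      exact of_decide_eq_false this
    simp only [Bool.not_false]
    rw [List.any_eq_true]
    rcases not_forall.1 (fun hall => hnnd (List.nodup_iff_count_le_one.2 hall)) with ⟨b, hb⟩
    have hb2 : 2 ≤ (u.map (pvCatOf clothes)).count b := by omega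
    have hbmem : b ∈ u.map (pvCatOf clothes) := by
      rw [← List.count_pos_iff]
      omega
    rcases List.mem_map.1 hbmem with ⟨e, he, hbe⟩
    refine ⟨b, ?_, ?_⟩
    · rw [← hbe]
      exact catOf_mem_ks clothes hpre (hu e he)
    · rw [hcount b]
      simp only [decide_eq_true_eq]
      omega

def pvZd (clothes : List (String × String)) : PySem.Dict String Int :=
  (pvKs clothes).foldl (fun (d : PySem.Dict String Int) o => d.insert o 0) PySem.Dict.empty

theorem pvZd_getD (clothes : List (String × String)) (q : String) : (pvZd clothes).getD q 0 = 0 := by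
  unfold pvZd
  rw [zerofold_getD]
  split <;> simp

theorem pvZd_keys (clothes : List (String × String)) : (pvZd clothes).keys = pvKs clothes := by
  unfold pvZd
  rw [PySem.Dict.keys_foldl_insert (pvKs clothes) (fun _ _ => 0) PySem.Dict.empty, PySem.Dict.keys_empty]
  exact PySem.Set.ofList_eq_self_of_nodup _ (nodup_ks clothes)

theorem step_u (clothes : List (String × String)) (hpre : (clothes.map Prod.fst).Nodup)
    (u : List String) (hu : ∀ e ∈ u, e ∈ pvNames clothes) (a : Int) :
    (fun (st : Int × PySem.Dict String Int) (u : List String) =>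
      let dh := u.foldl (fun dh e =>
        (pvKs clothes).foldl (fun (dh : PySem.Dict String Int) r =>
          if e ∈ (pvCatDict clothes).getD r [] then dh.modify r 0 (fun x => x + 1) else dh) dh) st.2
      let answer := if (pvKs clothes).any (fun p => 2 ≤ dh.getD p 0) then st.1 - 1 else st.1
      let dh := (pvKs clothes).foldl (fun (d : PySem.Dict String Int) t => d.insert t 0) dh
      (answer, dh)) (a, pvZd clothes) u
    = ((if pvGood clothes u then a else a - 1), pvZd clothes) := by
  simp only
  have hgetD : ∀ p ∈ pvKs clothes,
      ((u.foldl (fun dh e =>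
        (pvKs clothes).foldl (fun (dh : PySem.Dict String Int) r =>
          if e ∈ (pvCatDict clothes).getD r [] then dh.modify r 0 (fun x => x + 1) else dh) dh) (pvZd clothes)).getD p 0)
      = ((u.countP (fun e => decide (e ∈ (pvCatDict clothes).getD p []))) : Int) := by
    intro p hp
    rw [ufold_getD (pvCatDict clothes) (pvKs clothes) (nodup_ks clothes) u (pvZd clothes) p,
      pvZd_getD, if_pos hp]
    simp
  have hany : ((pvKs clothes).any (fun p => decide (2 ≤ ((u.foldl (fun dh e =>
        (pvKs clothes).foldl (fun (dh : PySem.Dict String Int) r =>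
          if e ∈ (pvCatDict clothes).getD r [] then dh.modify r 0 (fun x => x + 1) else dh) dh) (pvZd clothes)).getD p 0))))
      = !(pvGood clothes u) := by
    rw [PySem.List.any_congr_mem (g := fun p => decide (2 ≤ ((u.countP (fun e => decide (e ∈ (pvCatDict clothes).getD p []))) : Int)))
      (by intro p hp; rw [hgetD p hp])]
    exact cond_eq clothes hpre u hu
  have hkeys : ((u.foldl (fun dh e =>
        (pvKs clothes).foldl (fun (dh : PySem.Dict String Int) r =>
          if e ∈ (pvCatDict clothes).getD r [] then dh.modify r 0 (fun x => x + 1) else dh) dh) (pvZd clothes)).keys)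
      = pvKs clothes := by
    rw [ufold_keys (pvCatDict clothes) (pvKs clothes) u (pvZd clothes)
      (by rw [pvZd_keys]; exact fun r hr => hr), pvZd_keys]
  rw [hany, reset_eq (pvKs clothes) (nodup_ks clothes) _ hkeys]
  have : ((pvKs clothes).foldl (fun (d : PySem.Dict String Int) o => d.insert o 0) PySem.Dict.empty) = pvZd clothes := rfl
  rw [this]
  cases hgood : pvGood clothes u <;> simp

theorem step_w (clothes : List (String × String)) (hpre : (clothes.map Prod.fst).Nodup)
    (a : Int) (w : Int) :
    (fun (st : Int × PySem.Dict String Int) (w : Int) =>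
      let listCombi := pyCombos w.toNat (pvNames clothes)
      let answer := st.1 + (listCombi.length : Int)
      listCombi.foldl
        (fun (st : Int × PySem.Dict String Int) u =>
          let dh := u.foldl (fun dh e =>
            (pvKs clothes).foldl (fun (dh : PySem.Dict String Int) r =>
              if e ∈ (pvCatDict clothes).getD r [] then dh.modify r 0 (fun x => x + 1) else dh) dh) st.2
          let answer := if (pvKs clothes).any (fun p => 2 ≤ dh.getD p 0) then st.1 - 1 else st.1
          let dh := (pvKs clothes).foldl (fun (d : PySem.Dict String Int) t => d.insert t 0) dh
          (answer, dh))
        (answer, st.2)) (a, pvZd clothes) w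
    = (a + ((List.countP (pvGood clothes) (pyCombos w.toNat (pvNames clothes))) : Int), pvZd clothes) := by
  simp only
  rw [foldl_fix_snd (pyCombos w.toNat (pvNames clothes)) _
    (fun a u => if pvGood clothes u then a else a - 1) (pvZd clothes)
    (by
      intro a' u hu
      apply step_u clothes hpre u
      intro e he
      have hmem : u ∈ List.sublistsLen w.toNat (pvNames clothes) :=
        (pyCombos_perm w.toNat (pvNames clothes)).mem_iff.1 hu
      exact (List.mem_sublistsLen.1 hmem).1.subset he)]
  rw [foldl_goodsub (pvGood clothes) (pyCombos w.toNat (pvNames clothes))]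
  have hcong : (pyCombos w.toNat (pvNames clothes)).countP (fun a => decide (¬ pvGood clothes a = true))
      = (pyCombos w.toNat (pvNames clothes)).countP (fun u => !(pvGood clothes u)) := by
    apply List.countP_congr
    intro x _
    cases pvGood clothes x <;> simp
  have hlen := List.length_eq_countP_add_countP (p := pvGood clothes) (l := pyCombos w.toNat (pvNames clothes))
  rw [hcong] at hlen
  refine Prod.ext ?_ rfl
  show a + ((pyCombos w.toNat (pvNames clothes)).length : Int) - _ = a + _
  rw [hlen]
  push_cast
  ring

theorem solution_eq (clothes : List (String × String)) (hpre : (clothes.map Prod.fst).Nodup) :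
    solution clothes = ((pvNames clothes).length : ℤ)
      + ∑ w ∈ Finset.range ((pvKs clothes).length + 1),
          (if 2 ≤ w then ((List.countP (pvGood clothes) (List.sublistsLen w (pvNames clothes))) : ℤ) else 0) := by
  rw [solution]
  simp only
  rw [PySem.List.foldl_prod_mk (f := fun (acc : List String) (i : String × String) => acc ++ [i.1])
      (g := fun (d : PySem.Dict String (List String)) (i : String × String) =>
        if d.contains i.2 then d.modify i.2 [] (fun l => l ++ [i.1])
        else ((d.insert i.2 []).modify i.2 [] (fun l => l ++ [i.1])))]
  rw [PySem.List.foldl_append_singleton_eq_map (fun (i : String × String) => i.1) clothes []]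
  rw [catfold_eq clothes PySem.Dict.empty PySem.Dict.nodup_keys_empty]
  rw [show (clothes.foldl (fun d i => d.modify i.2 [] (fun l => l ++ [i.1])) PySem.Dict.empty) = pvCatDict clothes from rfl]
  rw [show (List.map (fun (i : String × String) => i.1) clothes) = pvNames clothes from rfl]
  simp only [List.nil_append, catdict_keys]
  rw [PySem.List.foldl_add (pvKs clothes) (fun _ => (1 : ℤ)) 0]
  rw [PySem.List.sum_map_const_int]
  rw [show ((pvKs clothes).foldl (fun (d : PySem.Dict String Int) o => d.insert o 0) PySem.Dict.empty) = pvZd clothes from rfl]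
  rw [zero_add, mul_one, zero_add]
  rw [foldl_fix_snd (PySem.List.pyRange 2 (((pvKs clothes).length : ℤ) + 1)) _
    (fun a w => a + ((List.countP (pvGood clothes) (pyCombos w.toNat (pvNames clothes))) : Int))
    (pvZd clothes) (fun a w _ => step_w clothes hpre a w)]
  rw [show ∀ (x : Int × PySem.Dict String Int), x.1 = x.fst from fun _ => rfl]
  rw [pyRange_fold (fun m => ((List.countP (pvGood clothes) (pyCombos m (pvNames clothes))) : Int))
    ((pvKs clothes).length) (((pvNames clothes).length : ℤ))]
  show _ + _ = _
  apply congrArg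
  apply Finset.sum_congr rfl
  intro w _
  by_cases h2 : 2 ≤ w
  · rw [if_pos h2, if_pos h2]
    exact_mod_cast congrArg (Nat.cast : ℕ → ℤ) ((pyCombos_perm w (pvNames clothes)).countP_eq (pvGood clothes))
  · rw [if_neg h2, if_neg h2]

-- ===== counting identities =====
theorem good_nil (clothes : List (String × String)) : pvGood clothes [] = true := by
  simp [pvGood]

theorem good_singleton (clothes : List (String × String)) (e : String) :
    pvGood clothes [e] = true := by
  simp [pvGood]

theorem G_zero (clothes : List (String × String)) :
    List.countP (pvGood clothes) (List.sublistsLen 0 (pvNames clothes)) = 1 := by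
  simp [List.sublistsLen_zero, good_nil]

theorem G_one (clothes : List (String × String)) :
    List.countP (pvGood clothes) (List.sublistsLen 1 (pvNames clothes)) = (pvNames clothes).length := by
  rw [List.sublistsLen_one, List.countP_map]
  have : ∀ x ∈ (pvNames clothes).reverse, ((pvGood clothes) ∘ (fun x => [x])) x = true := by
    intro x _
    simp [Function.comp_apply, good_singleton]
  rw [List.countP_eq_length.2 this, List.length_reverse]

theorem G_big (clothes : List (String × String)) (hpre : (clothes.map Prod.fst).Nodup)
    (w : ℕ) (hw : (pvKs clothes).length < w) :
    List.countP (pvGood clothes) (List.sublistsLen w (pvNames clothes)) = 0 := by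
  rw [List.countP_eq_zero]
  intro u hu
  rcases List.mem_sublistsLen.1 hu with ⟨hsub, hlen⟩
  intro hgood
  have hnd : (u.map (pvCatOf clothes)).Nodup := of_decide_eq_true hgood
  have hsubset : (u.map (pvCatOf clothes)).toFinset ⊆ (pvKs clothes).toFinset := by
    intro b hb
    rcases List.mem_map.1 (List.mem_toFinset.1 hb) with ⟨e, he, rfl⟩
    exact List.mem_toFinset.2 (catOf_mem_ks clothes hpre (hsub.subset he))
  have h1 : (u.map (pvCatOf clothes)).toFinset.card = w := by
    rw [List.toFinset_card_of_nodup hnd, List.length_map, hlen]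
  have h2 : (pvKs clothes).toFinset.card ≤ (pvKs clothes).length := List.toFinset_card_le _
  have := Finset.card_le_card hsubset
  omega

theorem G_gt_len (clothes : List (String × String)) (w : ℕ) (hw : (pvNames clothes).length < w) :
    List.countP (pvGood clothes) (List.sublistsLen w (pvNames clothes)) = 0 := by
  rw [List.sublistsLen_of_length_lt hw]
  rfl

theorem total_eq (clothes : List (String × String)) (hpre : (clothes.map Prod.fst).Nodup) :
    ∑ w ∈ Finset.range ((pvNames clothes).length + 1),
        List.countP (pvGood clothes) (List.sublistsLen w (pvNames clothes))
      = ∏ b ∈ (pvCats clothes).toFinset, ((pvCats clothes).count b + 1) := by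
  have hperm := List.range_bind_sublistsLen_perm (pvNames clothes)
  have h1 : List.countP (pvGood clothes)
      (List.flatMap (fun n => List.sublistsLen n (pvNames clothes)) (List.range ((pvNames clothes).length + 1)))
      = List.countP (pvGood clothes) (pvNames clothes).sublists' := hperm.countP_eq _
  rw [List.countP_flatMap] at h1
  have h2 : (List.map (List.countP (pvGood clothes) ∘ fun n => List.sublistsLen n (pvNames clothes))
      (List.range ((pvNames clothes).length + 1))).sum
      = ∑ w ∈ Finset.range ((pvNames clothes).length + 1),
          List.countP (pvGood clothes) (List.sublistsLen w (pvNames clothes)) :=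
    sum_list_range_eq _ _
  rw [h2] at h1
  rw [h1]
  have h3 : List.countP (pvGood clothes) (pvNames clothes).sublists'
      = List.countP (fun S => decide ((S.map (pvCatOf clothes)).Nodup)
          && decide (∀ a ∈ S, pvCatOf clothes a ∉ (∅ : Finset String))) (pvNames clothes).sublists' := by
    apply List.countP_congr
    intro S _
    simp [pvGood]
  rw [h3, countP_nodup_avoid (pvCatOf clothes) (pvNames clothes) ∅, Finset.sdiff_empty,
    map_catOf clothes hpre]

theorem foldl_mul (l : List ℤ) : ∀ a : ℤ, l.foldl (fun a c => a * (c + 1)) a = a * (l.map (fun c => c + 1)).prod := by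
  induction l with
  | nil => intro a; simp
  | cons c l ih =>
    intro a
    simp only [List.foldl_cons, List.map_cons, List.prod_cons, ih]
    ring

theorem alt_eq (clothes : List (String × String)) :
    solution_alt clothes
      = (∏ b ∈ (pvCats clothes).toFinset, (((pvCats clothes).count b : ℤ) + 1)) - 1 := by
  rw [solution_alt]
  have h1 : clothes.foldl (fun (d : PySem.Dict String Int) i => d.insert i.2 (d.getD i.2 0 + 1)) PySem.Dict.empty
      = PySem.Dict.counter (pvCats clothes) := by
    have hmap : (pvCats clothes).foldl (fun (d : PySem.Dict String Int) x => d.insert x (d.getD x 0 + 1)) PySem.Dict.empty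
        = clothes.foldl (fun (d : PySem.Dict String Int) i => d.insert i.2 (d.getD i.2 0 + 1)) PySem.Dict.empty := by
      rw [show pvCats clothes = clothes.map (fun i => i.2) from rfl, List.foldl_map]
    rw [← hmap]
    exact PySem.Dict.foldl_insert_getD_add_one_eq_counter _
  rw [h1]
  rw [PySem.Dict.values_eq_map_keys _ (by rw [PySem.Dict.keys_counter]; exact nodup_ks clothes) (0 : ℤ)]
  rw [PySem.Dict.keys_counter]
  have h2 : (PySem.Set.ofList (pvCats clothes)).map (fun k => (PySem.Dict.counter (pvCats clothes)).getD k 0)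
      = (pvKs clothes).map (fun k => (((pvCats clothes).count k : ℤ))) := by
    apply List.map_congr_left
    intro k _
    exact PySem.Dict.getD_counter _ _
  rw [h2, foldl_mul, one_mul, List.map_map]
  have h3 : ((pvKs clothes).map ((fun c => c + 1) ∘ fun k => ((pvCats clothes).count k : ℤ))).prod
      = ∏ b ∈ (pvKs clothes).toFinset, (((pvCats clothes).count b : ℤ) + 1) :=
    (List.prod_toFinset _ (nodup_ks clothes)).symm
  rw [h3]
  have h4 : (pvKs clothes).toFinset = (pvCats clothes).toFinset := by
    ext b
    simp [List.mem_toFinset, mem_ks clothes b]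
  rw [h4]

theorem final_sum (clothes : List (String × String)) (hpre : (clothes.map Prod.fst).Nodup) :
    ((pvNames clothes).length : ℤ)
      + ∑ w ∈ Finset.range ((pvKs clothes).length + 1),
          (if 2 ≤ w then ((List.countP (pvGood clothes) (List.sublistsLen w (pvNames clothes))) : ℤ) else 0)
      = (∏ b ∈ (pvCats clothes).toFinset, (((pvCats clothes).count b : ℤ) + 1)) - 1 := by
  set n := (pvNames clothes).length with hn
  set K := (pvKs clothes).length with hK
  set N := max K n with hN
  set G : ℕ → ℕ := fun w => List.countP (pvGood clothes) (List.sublistsLen w (pvNames clothes)) with hG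
  show (n : ℤ) + (∑ w ∈ Finset.range (K+1), if 2 ≤ w then (G w : ℤ) else 0) = _
  have hSK : (∑ w ∈ Finset.range (K+1), if 2 ≤ w then G w else 0)
      = ∑ w ∈ Finset.range (N+1), if 2 ≤ w then G w else 0 := by
    apply Finset.sum_subset
    · intro x hx
      simp only [Finset.mem_range] at hx ⊢
      have := le_max_left K n
      omega
    · intro w hw hnw
      simp only [Finset.mem_range] at hw hnw
      have hKw : K < w := by omega
      have : G w = 0 := G_big clothes hpre w hKw
      simp [this]
  have hTn : (∑ w ∈ Finset.range (n+1), G w) = ∑ w ∈ Finset.range (N+1), G w := by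
    apply Finset.sum_subset
    · intro x hx
      simp only [Finset.mem_range] at hx ⊢
      have := le_max_right K n
      omega
    · intro w hw hnw
      simp only [Finset.mem_range] at hw hnw
      have hnww : n < w := by omega
      exact G_gt_len clothes w hnww
  have hsplit : (∑ w ∈ Finset.range (N+1), G w)
      = G 0 + G 1 + ∑ w ∈ Finset.range (N+1), (if 2 ≤ w then G w else 0) := by
    have hpt : ∀ w, G w = (if w = 0 then G 0 else 0) + (if w = 1 then G 1 else 0) + (if 2 ≤ w then G w else 0) := by
      intro w
      match w with
      | 0 => simp
      | 1 => simp
      | (m+2) => simp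
    calc (∑ w ∈ Finset.range (N+1), G w)
        = ∑ w ∈ Finset.range (N+1), ((if w = 0 then G 0 else 0) + (if w = 1 then G 1 else 0) + (if 2 ≤ w then G w else 0)) :=
          Finset.sum_congr rfl (fun w _ => hpt w)
      _ = (∑ w ∈ Finset.range (N+1), if w = 0 then G 0 else 0)
          + (∑ w ∈ Finset.range (N+1), if w = 1 then G 1 else 0)
          + ∑ w ∈ Finset.range (N+1), (if 2 ≤ w then G w else 0) := by
          rw [Finset.sum_add_distrib, Finset.sum_add_distrib]
      _ = G 0 + G 1 + ∑ w ∈ Finset.range (N+1), (if 2 ≤ w then G w else 0) := by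
          congr 1
          congr 1
          · rw [Finset.sum_ite_eq' (Finset.range (N+1)) 0 (fun _ => G 0)]
            simp
          · rw [Finset.sum_ite_eq' (Finset.range (N+1)) 1 (fun _ => G 1)]
            by_cases h1 : 1 ∈ Finset.range (N+1)
            · simp [h1]
            · have hN0 : N = 0 := by simp [Finset.mem_range] at h1; omega
              have hn0 : n = 0 := by omega
              have hg1 : G 1 = n := G_one clothes
              simp [h1, hg1, hn0]
  have htotal := total_eq clothes hpre
  have hNat : (∏ b ∈ (pvCats clothes).toFinset, ((pvCats clothes).count b + 1))
      = 1 + n + ∑ w ∈ Finset.range (K+1), (if 2 ≤ w then G w else 0) := by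
    rw [← htotal, hTn, hsplit, hSK]
    have h0 : G 0 = 1 := G_zero clothes
    have h1 : G 1 = n := G_one clothes
    omega
  have hcast : (∏ b ∈ (pvCats clothes).toFinset, (((pvCats clothes).count b : ℤ) + 1))
      = ((∏ b ∈ (pvCats clothes).toFinset, ((pvCats clothes).count b + 1) : ℕ) : ℤ) := by
    push_cast
    rfl
  rw [hcast, hNat]
  push_cast
  ring

theorem solution_agrees (clothes : List (String × String)) (hpre : (clothes.map Prod.fst).Nodup) :
    solution clothes = solution_alt clothes := by
  rw [solution_eq clothes hpre, alt_eq clothes, final_sum clothes hpre]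

-- ===== VERDICT (by name: the statement is the Claim_ definition above) =====
theorem solution_spec : Claim_equal_solution := by
  intro clothes _ hpre
  unfold Spec_solution
  exact solution_agrees clothes hpre
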